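-- pv_equiv track=rewrite | github.com/ekpasowecabronneta-hue/duckclaw | packages/duckops/duckops/mlx_train_tqdm_patch.py | _count_eval_runs_after
-- ===== SOURCE A (Python) =====
-- def _schedules_eval_at_iter(it: int, iters: int, steps_per_eval: int, has_val: bool) -> bool:
--     """Misma condición que el bucle train (evaluate antes del step)."""
--     if not has_val:
--         return False
--     if it == 1 or it == iters:
--         return True
--     if steps_per_eval and steps_per_eval > 0 and it % steps_per_eval == 0:
--         return True
--     return False
--
-- def _count_eval_runs_after(
--     after_it: int, iters: int, steps_per_eval: int, has_val: bool
-- ) -> int: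
--     """Cuántas validaciones quedan en iteraciones (after_it, iters]."""
--     if not has_val:
--         return 0
--     return sum(
--         1
--         for j in range(after_it + 1, iters + 1)
--         if _schedules_eval_at_iter(j, iters, steps_per_eval, True)
--     )
-- ===== SOURCE B (Python) =====
-- def _count_eval_runs_after(after_it, iters, steps_per_eval, has_val):
--     """Closed-form count of scheduled evals in (after_it, iters]: endpoint
--     indicators plus multiples of steps_per_eval, with double counts removed."""
--     if not has_val:
--         return 0
--     lo = after_it + 1
--     hi = iters
--     if lo > hi:
--         return 0
--     total = 0
--     one_in = lo <= 1 <= hi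
--     end_in = lo <= iters and iters != 1  # iters <= hi always
--     if one_in:
--         total += 1
--     if end_in:
--         total += 1
--     s = steps_per_eval
--     if s > 0:
--         total += hi // s - (lo - 1) // s
--         if one_in and 1 % s == 0:
--             total -= 1
--         if end_in and iters % s == 0:
--             total -= 1
--     return total
-- ===== Notes on version B (the rewrite author's own statement) =====
-- stated objective: faster
-- what changed: Replaced A's linear scan over range(after_it+1, iters+1) with an O(1) closed form: endpoint indicators for iteration 1 and iters plus a floor-division count of multiples of steps_per_eval, subtracting the double-counted endpoints.
import Mathlib
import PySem

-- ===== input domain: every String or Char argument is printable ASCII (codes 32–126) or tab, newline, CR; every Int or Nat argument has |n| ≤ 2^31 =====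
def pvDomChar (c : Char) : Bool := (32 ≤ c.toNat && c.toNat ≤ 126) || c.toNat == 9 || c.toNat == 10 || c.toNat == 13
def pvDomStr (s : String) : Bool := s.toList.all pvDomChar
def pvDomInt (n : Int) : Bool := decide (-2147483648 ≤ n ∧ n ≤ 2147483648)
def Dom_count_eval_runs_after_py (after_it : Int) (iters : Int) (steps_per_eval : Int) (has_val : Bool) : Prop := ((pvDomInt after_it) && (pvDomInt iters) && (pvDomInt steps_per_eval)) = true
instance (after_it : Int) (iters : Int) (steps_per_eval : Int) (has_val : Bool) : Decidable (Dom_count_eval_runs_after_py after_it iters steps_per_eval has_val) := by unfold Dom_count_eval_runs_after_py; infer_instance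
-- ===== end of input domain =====

-- B replaces A's linear scan over range(after_it+1, iters+1) by an O(1) closed form
-- (endpoint indicators + floor-division count of multiples, minus double counts).

-- ===== PORT A =====
def schedules_eval_at_iter (it : Int) (iters : Int) (steps_per_eval : Int) (has_val : Bool) : Bool :=
  if !has_val then false
  else if it = 1 ∨ it = iters then true
  else if steps_per_eval ≠ 0 ∧ 0 < steps_per_eval ∧ PySem.Int.mod it steps_per_eval = 0 then true
  else false

def count_eval_runs_after_py (after_it : Int) (iters : Int) (steps_per_eval : Int) (has_val : Bool) : Int :=
  if !has_val then 0
  else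
    (PySem.List.pyRange (after_it + 1) (iters + 1) 1).foldl
      (fun acc j => if schedules_eval_at_iter j iters steps_per_eval true then acc + 1 else acc) 0

-- ===== PORT B =====
def count_eval_runs_after_py_alt (after_it : Int) (iters : Int) (steps_per_eval : Int) (has_val : Bool) : Int :=
  if !has_val then 0
  else
    let lo := after_it + 1
    if iters < lo then 0
    else
      let oneIn := lo ≤ 1 ∧ 1 ≤ iters
      let endIn := lo ≤ iters ∧ iters ≠ 1
      let base : Int := (if oneIn then 1 else 0) + (if endIn then 1 else 0)
      if 0 < steps_per_eval then
        base + (PySem.Int.floordiv iters steps_per_eval - PySem.Int.floordiv (lo - 1) steps_per_eval)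
          - (if oneIn ∧ PySem.Int.mod 1 steps_per_eval = 0 then 1 else 0)
          - (if endIn ∧ PySem.Int.mod iters steps_per_eval = 0 then 1 else 0)
      else base

-- ===== PRECONDITION & SPEC =====
def Spec_count_eval_runs_after_py (after_it : Int) (iters : Int) (steps_per_eval : Int) (has_val : Bool) (out : Int) : Prop := out = count_eval_runs_after_py_alt after_it iters steps_per_eval has_val
instance (after_it : Int) (iters : Int) (steps_per_eval : Int) (has_val : Bool) (out : Int) : Decidable (Spec_count_eval_runs_after_py after_it iters steps_per_eval has_val out) := by unfold Spec_count_eval_runs_after_py; infer_instance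

-- ===== CLAIM (what is proved, stated in full; the proofs are below) =====
def Claim_equal_count_eval_runs_after_py : Prop := ∀ (after_it : Int) (iters : Int) (steps_per_eval : Int) (has_val : Bool), Dom_count_eval_runs_after_py after_it iters steps_per_eval has_val → Spec_count_eval_runs_after_py after_it iters steps_per_eval has_val (count_eval_runs_after_py after_it iters steps_per_eval has_val)

-- ===== LEMMAS AND PROOFS =====

-- closed form for the count of scheduled evals over [lo, iters]
def gClosed (lo : Int) (iters : Int) (s : Int) : Int :=
  (if lo ≤ 1 ∧ 1 ≤ iters then 1 else 0) + (if lo ≤ iters ∧ iters ≠ 1 then 1 else 0)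
  + (if 0 < s then
      (PySem.Int.floordiv iters s - PySem.Int.floordiv (lo - 1) s)
        - (if (lo ≤ 1 ∧ 1 ≤ iters) ∧ PySem.Int.mod 1 s = 0 then 1 else 0)
        - (if (lo ≤ iters ∧ iters ≠ 1) ∧ PySem.Int.mod iters s = 0 then 1 else 0)
    else 0)

lemma fdiv_diff (lo s : Int) (hs : 0 < s) :
    PySem.Int.floordiv lo s - PySem.Int.floordiv (lo - 1) s
      = if PySem.Int.mod lo s = 0 then 1 else 0 := by
  set q := PySem.Int.floordiv lo s with hqdef
  have hq : q * s ≤ lo ∧ lo < (q + 1) * s := (PySem.Int.floordiv_eq_iff_of_pos hs).mp hqdef.symm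
  by_cases hm : PySem.Int.mod lo s = 0
  · have hdvd : s ∣ lo := (PySem.Int.mod_eq_zero_iff_dvd lo s).mp hm
    obtain ⟨k, hk⟩ := hdvd
    rw [mul_comm] at hk
    have hb1 : q * s ≤ k * s := by linarith [hq.1]
    have hb2 : k * s < (q + 1) * s := by linarith [hq.2]
    have hkq : k = q := by
      have u1 := le_of_mul_le_mul_right hb1 hs
      have u2 := lt_of_mul_lt_mul_right hb2 (le_of_lt hs)
      omega
    have hlo : lo = q * s := by rw [hk, hkq]
    have h2 : PySem.Int.floordiv (lo - 1) s = q - 1 := by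
      rw [PySem.Int.floordiv_eq_iff_of_pos hs]
      constructor
      · have e : (q - 1) * s = q * s - s := by ring
        rw [e, hlo]; linarith
      · have e : (q - 1 + 1) * s = q * s := by ring
        rw [e, hlo]; linarith
    rw [h2, if_pos hm]; ring
  · have hne : lo ≠ q * s := by
      intro h
      exact hm ((PySem.Int.mod_eq_zero_iff_dvd lo s).mpr ⟨q, by rw [h]; ring⟩)
    have hlt2 : q * s < lo := lt_of_le_of_ne hq.1 (fun h => hne h.symm)
    have h2 : PySem.Int.floordiv (lo - 1) s = q := by
      rw [PySem.Int.floordiv_eq_iff_of_pos hs]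
      exact ⟨by linarith, by linarith [hq.2]⟩
    rw [h2, if_neg hm]; ring

lemma gClosed_top (iters s : Int) : gClosed (iters + 1) iters s = 0 := by
  unfold gClosed
  have h1 : ¬(iters + 1 ≤ 1 ∧ 1 ≤ iters) := by omega
  have h2 : ¬(iters + 1 ≤ iters ∧ iters ≠ 1) := by omega
  have h3 : iters + 1 - 1 = iters := by ring
  rw [h3]
  split_ifs <;> omega

lemma ite_and_one (X M : Prop) [Decidable X] [Decidable M] :
    (if X ∧ M then (1:Int) else 0) = if X then (if M then (1:Int) else 0) else 0 := by
  split_ifs <;> tauto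

lemma step_arith (lo iters A B C m1 mi ml : Int) (hlo : lo ≤ iters)
    (hd : C - B = ml)
    (hm1 : lo = 1 → m1 = ml) (hmi : lo = iters → mi = ml) :
    (if lo ≤ 1 ∧ 1 ≤ iters then (1:Int) else 0) + (if lo ≤ iters ∧ iters ≠ 1 then 1 else 0)
      + ((A - B) - (if lo ≤ 1 ∧ 1 ≤ iters then m1 else 0)
          - (if lo ≤ iters ∧ iters ≠ 1 then mi else 0))
    = (if lo = 1 ∨ lo = iters then 1 else ml)
      + ((if lo + 1 ≤ 1 ∧ 1 ≤ iters then 1 else 0) + (if lo + 1 ≤ iters ∧ iters ≠ 1 then 1 else 0)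
        + ((A - C) - (if lo + 1 ≤ 1 ∧ 1 ≤ iters then m1 else 0)
            - (if lo + 1 ≤ iters ∧ iters ≠ 1 then mi else 0))) := by
  split_ifs <;> omega

lemma sched_pos (lo iters s : Int) (hs : 0 < s) :
    (if schedules_eval_at_iter lo iters s true = true then (1:Int) else 0)
      = if lo = 1 ∨ lo = iters then 1 else if PySem.Int.mod lo s = 0 then 1 else 0 := by
  have hs' : s ≠ 0 := by omega
  unfold schedules_eval_at_iter
  by_cases h1 : lo = 1 ∨ lo = iters <;> by_cases h2 : PySem.Int.mod lo s = 0 <;>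
    simp [h1, h2, hs, hs']

lemma sched_nonpos (lo iters s : Int) (hs : ¬ 0 < s) :
    (if schedules_eval_at_iter lo iters s true = true then (1:Int) else 0)
      = if lo = 1 ∨ lo = iters then 1 else 0 := by
  unfold schedules_eval_at_iter
  by_cases h1 : lo = 1 ∨ lo = iters <;> simp [h1, hs]

lemma gClosed_step (lo iters s : Int) (h : lo ≤ iters) :
    gClosed lo iters s
      = (if schedules_eval_at_iter lo iters s true then 1 else 0) + gClosed (lo + 1) iters s := by
  unfold gClosed
  have h3 : lo + 1 - 1 = lo := by ring
  rw [h3]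
  by_cases hs : 0 < s
  · rw [sched_pos lo iters s hs]
    simp only [if_pos hs]
    rw [ite_and_one (lo ≤ 1 ∧ 1 ≤ iters) (PySem.Int.mod 1 s = 0),
        ite_and_one (lo ≤ iters ∧ iters ≠ 1) (PySem.Int.mod iters s = 0),
        ite_and_one (lo + 1 ≤ 1 ∧ 1 ≤ iters) (PySem.Int.mod 1 s = 0),
        ite_and_one (lo + 1 ≤ iters ∧ iters ≠ 1) (PySem.Int.mod iters s = 0)]
    exact step_arith lo iters
      (PySem.Int.floordiv iters s) (PySem.Int.floordiv (lo - 1) s) (PySem.Int.floordiv lo s)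
      (if PySem.Int.mod 1 s = 0 then 1 else 0) (if PySem.Int.mod iters s = 0 then 1 else 0)
      (if PySem.Int.mod lo s = 0 then 1 else 0) h
      (fdiv_diff lo s hs)
      (fun hx => by rw [hx]) (fun hx => by rw [hx])
  · rw [sched_nonpos lo iters s hs]
    simp only [if_neg hs]
    split_ifs <;> omega

lemma fold_eq_gClosed (iters s : Int) : ∀ (n : Nat) (lo acc : Int), lo = iters + 1 - n →
    (PySem.List.pyRange lo (iters + 1) 1).foldl
      (fun acc j => if schedules_eval_at_iter j iters s true then acc + 1 else acc) acc
    = acc + gClosed lo iters s := by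
  intro n
  induction n with
  | zero =>
    intro lo acc h
    have hlo : lo = iters + 1 := by omega
    subst hlo
    rw [PySem.List.pyRange_one_eq_nil (le_refl _), gClosed_top]
    simp
  | succ n ih =>
    intro lo acc h
    have hlt : lo < iters + 1 := by omega
    rw [PySem.List.pyRange_one_cons hlt]
    simp only [List.foldl_cons]
    have h2 : lo + 1 = iters + 1 - (n : Int) := by push_cast at h ⊢; omega
    rw [ih (lo + 1) _ h2, gClosed_step lo iters s (by omega)]
    split_ifs <;> ring

-- ===== VERDICT (by name: the statement is the Claim_ definition above) =====
theorem count_eval_runs_after_py_spec : Claim_equal_count_eval_runs_after_py := by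
  intro a iters s hv _
  unfold Spec_count_eval_runs_after_py count_eval_runs_after_py count_eval_runs_after_py_alt
  cases hv with
  | false => simp
  | true =>
    simp only [Bool.not_true, Bool.false_eq_true, if_false]
    by_cases hlt : iters < a + 1
    · rw [PySem.List.pyRange_one_eq_nil (by omega)]
      simp [hlt]
    · have hn : (a + 1 : Int) = iters + 1 - ((iters + 1 - (a + 1)).toNat : Int) := by omega
      rw [fold_eq_gClosed iters s _ _ 0 hn]
      simp only [if_neg hlt, gClosed, zero_add]
      split_ifs <;> ring
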